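-- pv_equiv track=rewrite | github.com/rs929/Cornell-Courses | CS1110/lab14/lab14.py | number_not
-- ===== SOURCE A (Python) =====
-- def number_not(thelist, v):
--     """
--     Returns the number of elements in thelist that are NOT v.
--
--     Parameter thelist: the list to search
--     Precondition: thelist is a list of ints
--
--     Parameter v: the value to search for
--     Precondition: v is an int
--     """
--     if v not in thelist:
--         return len(thelist)
--     elif len(thelist) == 1 and v in thelist:
--         return 0
--
--     left = thelist[:1]
--     right = thelist[1:]
--
--     return number_not(left, v) + number_not(right, v)
-- ===== SOURCE B (Python) =====
-- def number_not(thelist, v):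
--     # Complement count: total length minus occurrences of v.
--     return len(thelist) - thelist.count(v)
-- ===== Notes on version B (the rewrite author's own statement) =====
-- stated objective: simpler
-- what changed: Replaces A's divide-and-conquer recursion (peeling one element per call) with a single complement computation: len(thelist) - thelist.count(v).
import Mathlib
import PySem

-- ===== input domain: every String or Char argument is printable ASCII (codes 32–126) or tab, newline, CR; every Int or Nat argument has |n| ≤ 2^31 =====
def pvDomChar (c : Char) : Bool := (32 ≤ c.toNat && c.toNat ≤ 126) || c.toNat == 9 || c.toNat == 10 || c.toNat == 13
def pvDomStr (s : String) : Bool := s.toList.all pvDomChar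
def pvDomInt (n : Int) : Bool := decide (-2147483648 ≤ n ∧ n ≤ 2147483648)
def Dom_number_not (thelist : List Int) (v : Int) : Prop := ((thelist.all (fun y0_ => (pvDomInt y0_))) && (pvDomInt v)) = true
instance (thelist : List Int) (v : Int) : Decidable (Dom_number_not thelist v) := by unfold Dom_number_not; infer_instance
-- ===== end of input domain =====

-- B replaces A's divide-and-conquer recursion with the complement count len(thelist) - thelist.count(v).

-- ===== PORT A =====
-- A's recursion: thelist[:1] = take 1, thelist[1:] = drop 1 (exact for these nonnegative slice bounds).
def number_not (thelist : List Int) (v : Int) : Int :=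
  if v ∉ thelist then (thelist.length : Int)
  else if thelist.length = 1 ∧ v ∈ thelist then 0
  else number_not (thelist.take 1) v + number_not (thelist.drop 1) v
termination_by thelist.length
decreasing_by
  · have hne : thelist ≠ [] := by rintro rfl; simp_all
    have hp : 0 < thelist.length := List.length_pos_iff.mpr hne
    have h2 : thelist.length ≠ 1 := by rintro h; simp_all
    rw [List.length_take]; omega
  · have hne : thelist ≠ [] := by rintro rfl; simp_all
    have hp : 0 < thelist.length := List.length_pos_iff.mpr hne
    rw [List.length_drop]; omega

-- ===== PORT B =====
def number_not_alt (thelist : List Int) (v : Int) : Int :=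
  (thelist.length : Int) - (PySem.List.count thelist v : Int)

-- ===== PRECONDITION & SPEC =====
def Spec_number_not (thelist : List Int) (v : Int) (out : Int) : Prop := out = number_not_alt thelist v
instance (thelist : List Int) (v : Int) (out : Int) : Decidable (Spec_number_not thelist v out) := by unfold Spec_number_not; infer_instance

-- ===== CLAIM (what is proved, stated in full; the proofs are below) =====
def Claim_equal_number_not : Prop := ∀ (thelist : List Int) (v : Int), Dom_number_not thelist v → Spec_number_not thelist v (number_not thelist v)

-- ===== LEMMAS AND PROOFS =====
theorem number_not_single (x v : Int) :
    number_not [x] v = if v = x then 0 else 1 := by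
  rw [number_not]
  by_cases h : v = x <;> simp [h]

theorem number_not_eq (thelist : List Int) (v : Int) :
    number_not thelist v = (thelist.length : Int) - (thelist.count v : Int) := by
  induction thelist with
  | nil => rw [number_not]; simp
  | cons x rest ih =>
    rw [number_not]
    by_cases hmem : v ∈ x :: rest
    · simp only [hmem, not_true_eq_false, if_false]
      by_cases hlen : (x :: rest).length = 1
      · simp only [hlen, and_self, if_true]
        have : rest = [] := by simpa using hlen
        subst this
        have : v = x := by simpa using hmem
        subst this; simp
      · simp only [hlen, false_and, if_false, List.take_succ_cons, List.take_zero,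
          List.drop_succ_cons, List.drop_zero]
        rw [number_not_single, ih]
        by_cases hx : v = x
        · simp [hx]
        · have hxv : x ≠ v := fun h => hx h.symm
          simp [hx, hxv, List.count_cons]
          ring
    · simp [hmem, List.count_eq_zero_of_not_mem hmem]

theorem number_not_spec : Claim_equal_number_not := by
  intro thelist v _
  unfold Spec_number_not number_not_alt
  rw [number_not_eq, PySem.List.count_eq]
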